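-- pv_equiv track=rewrite | github.com/CongyingXU/CodeMiningTeam_Tasks | CVE_HW/AnalyseComparedData/AnalyseCVEvsNVD.py | case2_4
-- ===== SOURCE A (Python) =====
-- def case2_4(CVEurl_list, NVDurl_list):
--     CVEurl_list = sorted(set(CVEurl_list))
--     NVDurl_list = sorted(set(NVDurl_list))
--     for url in NVDurl_list:
--         if url in CVEurl_list:
--             continue
--         else:
--             return False
--     return True
-- ===== SOURCE B (Python) =====
-- def case2_4(CVEurl_list, NVDurl_list):
--     cve = sorted(set(CVEurl_list))
--     nvd = sorted(set(NVDurl_list))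
--     i, j = 0, 0
--     while i < len(cve) and j < len(nvd):
--         if nvd[j] == cve[i]:
--             j += 1
--         elif cve[i] < nvd[j]:
--             i += 1
--         else:
--             return False
--     return j == len(nvd)
-- ===== Notes on version B (the rewrite author's own statement) =====
-- stated objective: alternative
-- what changed: Replaces the per-element membership scan of the sorted CVE list with a two-pointer merge walk over the two sorted deduped lists; trades per-element scans for a single linear merge.
import Mathlib
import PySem

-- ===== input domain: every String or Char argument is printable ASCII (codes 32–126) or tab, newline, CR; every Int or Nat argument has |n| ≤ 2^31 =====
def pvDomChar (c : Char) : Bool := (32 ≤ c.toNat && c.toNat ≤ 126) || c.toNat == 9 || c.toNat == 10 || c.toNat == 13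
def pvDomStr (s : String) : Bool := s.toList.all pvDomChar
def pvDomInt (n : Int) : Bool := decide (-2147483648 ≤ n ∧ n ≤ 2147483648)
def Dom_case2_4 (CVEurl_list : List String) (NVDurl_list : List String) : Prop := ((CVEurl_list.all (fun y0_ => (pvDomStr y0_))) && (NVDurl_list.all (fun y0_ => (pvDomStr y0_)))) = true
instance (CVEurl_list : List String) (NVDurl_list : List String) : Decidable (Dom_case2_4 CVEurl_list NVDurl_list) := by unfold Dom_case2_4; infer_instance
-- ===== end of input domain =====

-- ===== PORT A =====
-- A's for-loop over sorted(set(NVD)) with 'url in CVEurl_list' membership (linear scan)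
def case2_4_loop (cve : List String) : List String → Bool
  | [] => true
  | url :: rest => if url ∈ cve then case2_4_loop cve rest else false

def case2_4 (CVEurl_list : List String) (NVDurl_list : List String) : Bool :=
  case2_4_loop (PySem.List.sorted (PySem.Set.ofList CVEurl_list) (fun x => x) false)
    (PySem.List.sorted (PySem.Set.ofList NVDurl_list) (fun x => x) false)

-- ===== PORT B =====
-- B's two-pointer merge walk over both sorted deduped lists
def case2_4_merge : List String → List String → Bool
  | _, [] => true
  | [], _ :: _ => false
  | c :: cs, n :: ns =>
    if n = c then case2_4_merge (c :: cs) ns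
    else if c < n then case2_4_merge cs (n :: ns)
    else false
termination_by cs ns => cs.length + ns.length

def case2_4_alt (CVEurl_list : List String) (NVDurl_list : List String) : Bool :=
  case2_4_merge (PySem.List.sorted (PySem.Set.ofList CVEurl_list) (fun x => x) false)
    (PySem.List.sorted (PySem.Set.ofList NVDurl_list) (fun x => x) false)

-- ===== PRECONDITION & SPEC =====
def Spec_case2_4 (CVEurl_list : List String) (NVDurl_list : List String) (out : Bool) : Prop := out = case2_4_alt CVEurl_list NVDurl_list
instance (CVEurl_list : List String) (NVDurl_list : List String) (out : Bool) : Decidable (Spec_case2_4 CVEurl_list NVDurl_list out) := by unfold Spec_case2_4; infer_instance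

-- ===== CLAIM (what is proved, stated in full; the proofs are below) =====
def Claim_equal_case2_4 : Prop := ∀ (CVEurl_list : List String) (NVDurl_list : List String), Dom_case2_4 CVEurl_list NVDurl_list → Spec_case2_4 CVEurl_list NVDurl_list (case2_4 CVEurl_list NVDurl_list)

-- ===== LEMMAS AND PROOFS =====

lemma all_congr' {α : Type} {l : List α} {f g : α → Bool} (h : ∀ x ∈ l, f x = g x) :
    l.all f = l.all g := by
  induction l with
  | nil => rfl
  | cons a t ih =>
    simp only [List.all_cons, h a (List.mem_cons_self ..),
      ih fun x hx => h x (List.mem_cons_of_mem _ hx)]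

lemma loop_eq_all (cve : List String) : ∀ nvd : List String,
    case2_4_loop cve nvd = nvd.all (fun x => decide (x ∈ cve))
  | [] => rfl
  | url :: rest => by
    simp only [case2_4_loop, List.all_cons]
    by_cases h : url ∈ cve <;> simp [h, loop_eq_all cve rest]

lemma merge_eq_all : ∀ (cve nvd : List String), cve.Pairwise (· < ·) → nvd.Pairwise (· < ·) →
    case2_4_merge cve nvd = nvd.all (fun x => decide (x ∈ cve))
  | _, [], _, _ => by simp [case2_4_merge]
  | [], n :: ns, _, _ => by simp [case2_4_merge]
  | c :: cs, n :: ns, hc, hn => by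
    rw [case2_4_merge]
    rcases lt_trichotomy n c with hlt | heq | hgt
    · have hne : ¬ (n = c) := ne_of_lt hlt
      have hnc : n ∉ c :: cs := by
        simp only [List.mem_cons, not_or]
        refine ⟨hne, fun hmem => ?_⟩
        exact absurd (hlt.trans ((List.pairwise_cons.mp hc).1 n hmem)) (lt_irrefl n)
      rw [if_neg hne, if_neg (not_lt_of_gt hlt)]
      rw [List.all_cons, decide_eq_false hnc, Bool.false_and]
    · subst heq
      have : n ∈ n :: cs := List.mem_cons_self ..
      simp only [List.all_cons, this, decide_true, Bool.true_and]
      exact merge_eq_all (n :: cs) ns hc (List.pairwise_cons.mp hn).2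
    · have hne : ¬ (n = c) := (ne_of_gt hgt)
      rw [if_neg hne, if_pos hgt,
        merge_eq_all cs (n :: ns) (List.pairwise_cons.mp hc).2 hn]
      refine all_congr' (fun x hx => ?_)
      have hcx : c < x := by
        rcases List.mem_cons.mp hx with rfl | hx
        · exact hgt
        · exact hgt.trans ((List.pairwise_cons.mp hn).1 x hx)
      simp [List.mem_cons, ne_of_gt hcx]
termination_by cve nvd => cve.length + nvd.length

-- ===== VERDICT (by name: the statement is the Claim_ definition above) =====
theorem case2_4_spec : Claim_equal_case2_4 := by
  intro cve nvd _
  unfold Spec_case2_4 case2_4 case2_4_alt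
  rw [loop_eq_all, merge_eq_all _ _ (PySem.List.sorted_ofList_pairwise_lt cve)
    (PySem.List.sorted_ofList_pairwise_lt nvd)]
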